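-- pv_equiv track=rewrite | github.com/nkossally/image-encrypter | api/key_expansion.py | convert_binary_key_to_arr
-- ===== SOURCE A (Python) =====
-- FOUR = 4
--
-- EIGHT = 8
--
-- def convert_binary_key_to_arr(key):
--     bytes_arr = []
--     for i in range(FOUR):
--         row = []
--         for j in range(FOUR):
--             start_idx = EIGHT * i + EIGHT * FOUR * j
--             bytes = key[start_idx: start_idx + EIGHT]
--             row.append(bytes)
--         bytes_arr.append(row)
--
--     return bytes_arr
-- ===== SOURCE B (Python) =====
-- FOUR = 4
--
-- EIGHT = 8
--
-- def convert_binary_key_to_arr(key):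
--     chunks = [key[8 * p: 8 * p + 8] for p in range(16)]
--     return [chunks[i::4] for i in range(4)]
-- ===== Notes on version B (the rewrite author's own statement) =====
-- stated objective: simpler
-- what changed: Replaces the nested row-by-row loops computing 8*i+32*j offsets with a flat cut of the key into 16 consecutive 8-byte chunks followed by a column-major reshape via strided slices chunks[i::4].
import Mathlib
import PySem

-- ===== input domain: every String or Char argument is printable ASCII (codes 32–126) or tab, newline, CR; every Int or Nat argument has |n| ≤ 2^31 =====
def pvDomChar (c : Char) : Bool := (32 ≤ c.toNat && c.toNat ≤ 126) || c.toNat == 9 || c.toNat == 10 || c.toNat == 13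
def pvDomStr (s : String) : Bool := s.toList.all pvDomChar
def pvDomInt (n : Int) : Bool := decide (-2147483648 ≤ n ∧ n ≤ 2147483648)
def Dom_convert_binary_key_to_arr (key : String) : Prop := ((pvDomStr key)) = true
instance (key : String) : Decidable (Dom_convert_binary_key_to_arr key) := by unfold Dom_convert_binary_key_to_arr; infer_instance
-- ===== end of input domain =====

-- B replaces the nested row/column offset loops with a flat cut into 16 chunks reshaped column-major via strided slices (objective: simpler).
-- ===== PORT A =====
def pvFOUR : Int := 4
def pvEIGHT : Int := 8

def convert_binary_key_to_arr (key : String) : List (List String) :=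
  (PySem.List.pyRange 0 pvFOUR 1).foldl (fun bytes_arr i =>
    bytes_arr ++ [(PySem.List.pyRange 0 pvFOUR 1).foldl (fun row j =>
      let start_idx := pvEIGHT * i + pvEIGHT * pvFOUR * j
      let bytes := PySem.Str.slice key (some start_idx) (some (start_idx + pvEIGHT))
      row ++ [bytes]) []]) []

-- ===== PORT B =====
def convert_binary_key_to_arr_alt (key : String) : List (List String) :=
  let chunks := (PySem.List.pyRange 0 16 1).map (fun p =>
    PySem.Str.slice key (some (8 * p)) (some (8 * p + 8)))
  (PySem.List.pyRange 0 pvFOUR 1).map (fun i =>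
    (PySem.List.slice? chunks (some i) none pvFOUR).getD [])

-- ===== PRECONDITION & SPEC =====
def Spec_convert_binary_key_to_arr (key : String) (out : List (List String)) : Prop := out = convert_binary_key_to_arr_alt key
instance (key : String) (out : List (List String)) : Decidable (Spec_convert_binary_key_to_arr key out) := by unfold Spec_convert_binary_key_to_arr; infer_instance

-- ===== CLAIM (what is proved, stated in full; the proofs are below) =====
def Claim_equal_convert_binary_key_to_arr : Prop := ∀ (key : String), Dom_convert_binary_key_to_arr key → Spec_convert_binary_key_to_arr key (convert_binary_key_to_arr key)

-- ===== LEMMAS AND PROOFS =====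

-- ===== VERDICT (by name: the statement is the Claim_ definition above) =====
theorem convert_binary_key_to_arr_spec : Claim_equal_convert_binary_key_to_arr := by
  intro key _
  unfold Spec_convert_binary_key_to_arr convert_binary_key_to_arr convert_binary_key_to_arr_alt pvFOUR pvEIGHT
  simp [PySem.List.pyRange, PySem.List.slice?, PySem.List.sliceIndices, List.range_succ]
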